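-- pv_equiv track=rewrite | github.com/niansong1996/wassp | table/utils.py | get_statements
-- ===== SOURCE A (Python) =====
-- def get_statements(program):
--     statements = []
--
--     line = []
--     for token in program:
--         if token == '<END>':
--             break
--         else:
--             line.append(token)
--             if token == ')':
--                 statements.append(line)
--                 line = []
--
--     return statements
-- ===== SOURCE B (Python) =====
-- def get_statements(program):
--     # truncate at the first '<END>', then repeatedly cut off the prefix
--     # up to and including the next ')'
--     if '<END>' in program:
--         prog = program[:program.index('<END>')]
--     else:
--         prog = list(program)
--     out = []
--     while ')' in prog:
--         i = prog.index(')')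
--         out.append(prog[:i + 1])
--         prog = prog[i + 1:]
--     return out
-- ===== Notes on version B (the rewrite author's own statement) =====
-- stated objective: alternative
-- what changed: B truncates at the first '<END>' and then repeatedly finds the next ')' with list.index and slices the statement off, instead of A's token-by-token loop with a mutable line buffer.
import Mathlib
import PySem

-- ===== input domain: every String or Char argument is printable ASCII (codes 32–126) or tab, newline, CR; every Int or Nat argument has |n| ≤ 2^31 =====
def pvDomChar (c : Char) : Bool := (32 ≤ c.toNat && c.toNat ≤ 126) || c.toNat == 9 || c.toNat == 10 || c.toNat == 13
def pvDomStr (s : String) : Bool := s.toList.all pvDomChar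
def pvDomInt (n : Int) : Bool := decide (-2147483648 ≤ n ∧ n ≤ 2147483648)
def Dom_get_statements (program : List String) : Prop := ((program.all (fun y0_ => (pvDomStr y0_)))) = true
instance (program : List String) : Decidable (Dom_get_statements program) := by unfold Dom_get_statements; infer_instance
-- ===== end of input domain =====

-- B truncates at the first '<END>' and then repeatedly finds the next ')' and slices the
-- statement off, instead of A's token-by-token loop with a mutable line buffer (alternative decomposition).

-- ===== PORT A =====
-- loop over tokens with the accumulated current line; '<END>' breaks, ')' flushes the line
def getStatementsLoopA (prog : List String) (line : List String) : List (List String) :=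
  match prog with
  | [] => []
  | t :: rest =>
    if t = "<END>" then []
    else
      let line' := line ++ [t]
      if t = ")" then line' :: getStatementsLoopA rest [] else getStatementsLoopA rest line'

def get_statements (program : List String) : List (List String) :=
  getStatementsLoopA program []

-- ===== PORT B =====
-- while ')' in prog: i = prog.index(')'); emit prog[:i+1]; prog = prog[i+1:]
-- (slices prog[:k] / prog[k:] with 0 ≤ k are exactly List.take k / List.drop k)
def getStatementsCutB (prog : List String) : List (List String) :=
  match h : PySem.List.index? prog ")" with
  | none => []
  | some i => prog.take (i + 1) :: getStatementsCutB (prog.drop (i + 1))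
termination_by prog.length
decreasing_by
  have hmem : (")" : String) ∈ prog := (PySem.List.index?_isSome_iff prog ")").mp (by rw [h]; rfl)
  have : prog.length ≠ 0 := by
    intro h0; rw [List.length_eq_zero_iff] at h0; subst h0; simp at hmem
  simp [List.length_drop]; omega

def get_statements_alt (program : List String) : List (List String) :=
  let prog :=
    match PySem.List.index? program "<END>" with
    | none => program
    | some i => program.take i
  getStatementsCutB prog

-- ===== PRECONDITION & SPEC =====
def Spec_get_statements (program : List String) (out : List (List String)) : Prop := out = get_statements_alt program
instance (program : List String) (out : List (List String)) : Decidable (Spec_get_statements program out) := by unfold Spec_get_statements; infer_instance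

-- ===== CLAIM (what is proved, stated in full; the proofs are below) =====
def Claim_equal_get_statements : Prop := ∀ (program : List String), Dom_get_statements program → Spec_get_statements program (get_statements program)

-- ===== LEMMAS AND PROOFS =====

-- prepend l to the first statement (how A's pending line relates to B's clean cut)
def prependFirst (l : List String) : List (List String) → List (List String)
  | [] => []
  | h :: t => (l ++ h) :: t

theorem prependFirst_nil (xs : List (List String)) : prependFirst [] xs = xs := by
  cases xs <;> simp [prependFirst]

theorem cutB_none (prog : List String) (h : PySem.List.index? prog ")" = none) :
    getStatementsCutB prog = [] := by
  rw [getStatementsCutB]; split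
  · rfl
  · rename_i i heq; rw [h] at heq; cases heq

theorem cutB_some (prog : List String) (i : Nat) (h : PySem.List.index? prog ")" = some i) :
    getStatementsCutB prog = prog.take (i + 1) :: getStatementsCutB (prog.drop (i + 1)) := by
  rw [getStatementsCutB]; split
  · rename_i heq; rw [h] at heq; cases heq
  · rename_i j heq; rw [h] at heq; injection heq with e; subst e; rfl

theorem trunc_eq_takeWhile (p : List String) :
    (match PySem.List.index? p "<END>" with
     | none => p
     | some i => p.take i) = p.takeWhile (fun t => decide (t ≠ "<END>")) := by
  induction p with
  | nil => simp [PySem.List.index?]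
  | cons t rest ih =>
    by_cases ht : t = "<END>"
    · subst ht
      rw [PySem.List.index?_cons_self]
      simp [List.takeWhile]
    · rw [PySem.List.index?_cons_of_ne rest ht]
      cases hrest : PySem.List.index? rest "<END>" with
      | none =>
        rw [hrest] at ih; simp only at ih
        simp only [Option.map_none]
        simp only [List.takeWhile_cons, ne_eq, ht, not_false_iff, decide_true, if_true]
        simpa using ih
      | some i =>
        rw [hrest] at ih; simp only at ih
        simp only [Option.map_some]
        simp only [List.takeWhile_cons, ne_eq, ht, not_false_iff, decide_true, if_true,
          List.take_succ_cons]
        simpa using ih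

theorem loopA_eq_takeWhile (p : List String) (line : List String) :
    getStatementsLoopA p line =
      getStatementsLoopA (p.takeWhile (fun t => decide (t ≠ "<END>"))) line := by
  induction p generalizing line with
  | nil => rfl
  | cons t rest ih =>
    by_cases ht : t = "<END>"
    · subst ht; simp [getStatementsLoopA, List.takeWhile]
    · have hcons : (t :: rest).takeWhile (fun t => decide (t ≠ "<END>")) =
        t :: rest.takeWhile (fun t => decide (t ≠ "<END>")) := by
        simp [ht]
      rw [hcons]
      by_cases hp : t = ")"
      · simp [getStatementsLoopA, hp, ih]
      · simp only [getStatementsLoopA, ht, hp, if_false]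
        rw [ih]

theorem loopA_eq_cutB (q : List String) (line : List String) (hq : "<END>" ∉ q) :
    getStatementsLoopA q line = prependFirst line (getStatementsCutB q) := by
  induction q generalizing line with
  | nil => simp [getStatementsLoopA, cutB_none, PySem.List.index?, prependFirst]
  | cons t rest ih =>
    have ht : t ≠ "<END>" := fun h => hq (h ▸ List.mem_cons_self ..)
    have hrest : "<END>" ∉ rest := fun h => hq (List.mem_cons_of_mem _ h)
    by_cases hp : t = ")"
    · subst hp
      rw [cutB_some (")" :: rest) 0 (PySem.List.index?_cons_self _ _)]
      simp only [getStatementsLoopA, ht]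
      rw [ih [] hrest, prependFirst_nil]
      simp [prependFirst]
    · have hidx' := PySem.List.index?_cons_of_ne (x := t) (v := ")") rest hp
      simp only [getStatementsLoopA, ht, hp, if_false]
      rw [ih (line ++ [t]) hrest]
      cases hidx : PySem.List.index? rest ")" with
      | none =>
        rw [hidx] at hidx'
        rw [cutB_none rest hidx, cutB_none (t :: rest) (by simpa using hidx')]
        simp [prependFirst]
      | some i =>
        rw [hidx] at hidx'
        rw [cutB_some rest i hidx, cutB_some (t :: rest) (i + 1) (by simpa using hidx')]
        simp [prependFirst, List.take_succ_cons, List.drop_succ_cons]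

theorem notEnd_takeWhile (p : List String) :
    "<END>" ∉ p.takeWhile (fun t => decide (t ≠ "<END>")) := by
  intro h
  have := List.mem_takeWhile_imp h
  simp at this

-- ===== VERDICT (by name: the statement is the Claim_ definition above) =====
theorem get_statements_spec : Claim_equal_get_statements := by
  intro program _
  unfold Spec_get_statements get_statements get_statements_alt
  rw [trunc_eq_takeWhile, loopA_eq_takeWhile,
    loopA_eq_cutB _ _ (notEnd_takeWhile program), prependFirst_nil]
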